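-- pv_equiv track=rewrite | github.com/cmb-tw/CMB_NER | corpus/dataSynthesis.py | convert_to_sequence_labeling
-- ===== SOURCE A (Python) =====
-- def convert_to_sequence_labeling(text, slot):
--     labeled_text = []
--     start_index = 0
--
--     while True:
--         index = text.find(slot, start_index)
--         if index == -1:
--             break
--
--         prefix = text[start_index:index]
--         if prefix:
--             labeled_text.extend([char + "\tO" for char in prefix])
--
--         labeled_text.append(slot[0] + "\tB-ORG")
--         labeled_text.extend([char + "\tI-ORG" for char in slot[1:]])
--
--         start_index = index + len(slot)
--
--     remaining_text = text[start_index:]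
--     if remaining_text:
--         labeled_text.extend([char + "\tO" for char in remaining_text])
--
--     return labeled_text
-- ===== SOURCE B (Python) =====
-- def convert_to_sequence_labeling(text, slot):
--     # Two staged passes: pass 1 collects the start indices of the
--     # non-overlapping matches; pass 2 classifies every character position
--     # independently against those indices.
--     head = slot[0]
--     n = len(slot)
--     starts = []
--     pos = 0
--     while True:
--         idx = text.find(slot, pos)
--         if idx == -1:
--             break
--         starts.append(idx)
--         pos = idx + n
--     return [head + "\tB-ORG" if i in starts
--             else c + "\tI-ORG" if any(s < i < s + n for s in starts)
--             else c + "\tO"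
--             for i, c in enumerate(text)]
-- ===== Notes on version B (the rewrite author's own statement) =====
-- stated objective: alternative
-- what changed: B replaces A's single sequential emit loop by two staged passes: it first collects the list of non-overlapping match start indices, then classifies every character position independently (B at a start, I strictly inside a match interval, O otherwise).
import Mathlib
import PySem

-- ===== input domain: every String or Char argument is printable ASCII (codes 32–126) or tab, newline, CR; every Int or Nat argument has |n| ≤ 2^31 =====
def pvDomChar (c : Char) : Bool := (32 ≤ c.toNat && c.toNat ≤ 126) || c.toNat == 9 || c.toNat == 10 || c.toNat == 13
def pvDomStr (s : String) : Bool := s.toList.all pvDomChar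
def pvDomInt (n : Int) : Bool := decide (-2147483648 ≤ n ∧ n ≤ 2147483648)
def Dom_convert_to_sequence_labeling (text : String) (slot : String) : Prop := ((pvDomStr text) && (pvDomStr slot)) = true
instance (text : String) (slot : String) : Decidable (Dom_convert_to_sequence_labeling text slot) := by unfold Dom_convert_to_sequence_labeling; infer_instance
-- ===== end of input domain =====

-- B replaces A's single sequential emit loop by two staged passes: collect the match
-- start indices, then classify each character position independently against them;
-- objective: alternative decomposition, same cost.

-- ===== PORT A =====
-- char + "\tO" etc. (string concatenation of a char and an ASCII literal)
def pvTagO (c : Char) : String := String.ofList [c, '\t', 'O']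
def pvTagB (c : Char) : String := String.ofList [c, '\t', 'B', '-', 'O', 'R', 'G']
def pvTagI (c : Char) : String := String.ofList [c, '\t', 'I', '-', 'O', 'R', 'G']

-- termination fact for the scan loops, cited by the ports' `decreasing_by`
theorem pvFindFrom_bounds (t s : List Char) (k : Nat) (hk : k ≤ t.length)
    (h : PySem.Chars.findFrom t s (k : Int) ≠ -1) :
    k ≤ (PySem.Chars.findFrom t s (k : Int)).toNat ∧
    (PySem.Chars.findFrom t s (k : Int)).toNat + s.length ≤ t.length := by
  obtain ⟨h1, h2, h3⟩ := PySem.Chars.findFrom_natCast_spec t s k hk h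
  have hk' : k ≤ (PySem.Chars.findFrom t s (k : Int)).toNat := by omega
  refine ⟨hk', ?_⟩
  rcases s with _ | ⟨c, s1⟩
  · have hle : (PySem.Chars.findFrom t [] (k : Int)).toNat ≤ k := by
      by_contra hlt
      exact h3 k le_rfl (by omega) List.nil_prefix
    simpa using by omega
  · have hlen := h2.length_le
    have h4 : (c :: s1).length ≤ t.length - (PySem.Chars.findFrom t (c :: s1) (k : Int)).toNat := by
      simpa using hlen
    have hpos : 0 < (c :: s1).length := by simp
    omega

-- A's while-loop: emit prefix 'O' tags, then B-/I- tags of the match, advance past it.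
-- (the `[]` branch is where Python raises IndexError on slot[0]; excluded by Pre_)
def pvALoop (t s : List Char) (start : Nat) (hst : start ≤ t.length) (acc : List String) : List String :=
  if h : PySem.Chars.findFrom t s (start : Int) = -1 then
    acc ++ (t.drop start).map pvTagO
  else
    match s, h with
    | [], _ => acc
    | c0 :: s1, h =>
      pvALoop t (c0 :: s1) ((PySem.Chars.findFrom t (c0 :: s1) (start : Int)).toNat + (s1.length + 1))
        (by have hb := pvFindFrom_bounds t (c0 :: s1) start hst h; simp at hb; omega)
        (acc ++ ((t.drop start).take ((PySem.Chars.findFrom t (c0 :: s1) (start : Int)).toNat - start)).map pvTagO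
             ++ (pvTagB c0 :: s1.map pvTagI))
termination_by t.length - start
decreasing_by
  have hb := pvFindFrom_bounds t (c0 :: s1) start hst h
  simp at hb; omega

def convert_to_sequence_labeling (text : String) (slot : String) : List String :=
  pvALoop text.toList slot.toList 0 (Nat.zero_le _) []

-- ===== PORT B =====
-- pass 1: the start indices of the non-overlapping matches, left to right
def pvCollect (t : List Char) (c0 : Char) (s1 : List Char) (start : Nat) (hst : start ≤ t.length) : List Int :=
  if h : PySem.Chars.findFrom t (c0 :: s1) (start : Int) = -1 then []
  else
    PySem.Chars.findFrom t (c0 :: s1) (start : Int)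
      :: pvCollect t c0 s1 ((PySem.Chars.findFrom t (c0 :: s1) (start : Int)).toNat + (s1.length + 1))
           (by have hb := pvFindFrom_bounds t (c0 :: s1) start hst h; simp at hb; omega)
termination_by t.length - start
decreasing_by
  have hb := pvFindFrom_bounds t (c0 :: s1) start hst h
  simp at hb; omega

-- pass 2: classify one position against the collected starts
def pvTag (starts : List Int) (m : Int) (c0 : Char) (i : Int) (c : Char) : String :=
  if i ∈ starts then pvTagB c0
  else if starts.any (fun s => s < i && i < s + m) then pvTagI c
  else pvTagO c

-- (the `[]` branch is where Python raises IndexError on slot[0]; outside Pre_)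
def convert_to_sequence_labeling_alt (text : String) (slot : String) : List String :=
  match slot.toList with
  | [] => []
  | c0 :: s1 =>
    (PySem.List.enumerate text.toList 0).map
      (fun ic => pvTag (pvCollect text.toList c0 s1 0 (Nat.zero_le _)) ((s1.length + 1 : Nat) : Int) c0 ic.1 ic.2)

-- ===== PRECONDITION & SPEC =====
-- Pre_ excludes exactly the empty slot, on which A (and B) raise IndexError at slot[0].
def Pre_convert_to_sequence_labeling (text : String) (slot : String) : Prop := slot ≠ ""
instance (text : String) (slot : String) : Decidable (Pre_convert_to_sequence_labeling text slot) := by unfold Pre_convert_to_sequence_labeling; infer_instance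
def pvWitness_convert_to_sequence_labeling : String × String := ("abcab", "ab")

def Spec_convert_to_sequence_labeling (text : String) (slot : String) (out : List String) : Prop := out = convert_to_sequence_labeling_alt text slot
instance (text : String) (slot : String) (out : List String) : Decidable (Spec_convert_to_sequence_labeling text slot out) := by unfold Spec_convert_to_sequence_labeling; infer_instance

-- ===== CLAIM (what is proved, stated in full; the proofs are below) =====
def Claim_equal_convert_to_sequence_labeling : Prop := ∀ (text : String) (slot : String), Dom_convert_to_sequence_labeling text slot → Pre_convert_to_sequence_labeling text slot → Spec_convert_to_sequence_labeling text slot (convert_to_sequence_labeling text slot)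

-- ===== LEMMAS AND PROOFS =====

-- A's loop only appends to its accumulator
theorem pvALoop_acc (n : Nat) : ∀ (t s : List Char) (start : Nat) (hst : start ≤ t.length)
    (acc : List String), t.length - start ≤ n →
    pvALoop t s start hst acc = acc ++ pvALoop t s start hst [] := by
  induction n with
  | zero =>
    intro t s start hst acc hn
    rw [pvALoop, pvALoop]
    split
    · simp
    · rename_i h
      rcases s with _ | ⟨c0, s1⟩
      · simp
      · exfalso
        have hb := pvFindFrom_bounds t (c0 :: s1) start hst h
        simp at hb; omega
  | succ n ih =>
    intro t s start hst acc hn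
    rw [pvALoop, pvALoop]
    split
    · simp
    · rename_i h
      rcases s with _ | ⟨c0, s1⟩
      · simp
      · have hb := pvFindFrom_bounds t (c0 :: s1) start hst h
        simp at hb
        dsimp only
        rw [ih t (c0 :: s1) _ _ _ (by omega)]
        conv_rhs => rw [ih t (c0 :: s1) _ _ _ (by omega)]
        simp

-- every collected start lies at or after the scan position
theorem pvCollect_ge (n : Nat) : ∀ (t : List Char) (c0 : Char) (s1 : List Char) (start : Nat)
    (hst : start ≤ t.length), t.length - start ≤ n →
    ∀ x ∈ pvCollect t c0 s1 start hst, (start : Int) ≤ x := by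
  induction n with
  | zero =>
    intro t c0 s1 start hst hn x hx
    rw [pvCollect] at hx
    split at hx
    · simp at hx
    · rename_i h
      exfalso
      have hb := pvFindFrom_bounds t (c0 :: s1) start hst h
      simp at hb; omega
  | succ n ih =>
    intro t c0 s1 start hst hn x hx
    rw [pvCollect] at hx
    split at hx
    · simp at hx
    · rename_i h
      have hb := pvFindFrom_bounds t (c0 :: s1) start hst h
      obtain ⟨h1, _, _⟩ := PySem.Chars.findFrom_natCast_spec t (c0 :: s1) start hst h
      simp at hb
      rcases List.mem_cons.mp hx with rfl | hx'
      · exact h1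
      · have := ih t c0 s1 _ _ (by omega) x hx'
        omega

-- a run of positions clear of every start interval renders as 'O' tags
theorem pvSegO (starts : List Int) (m : Int) (c0 : Char) (hm : 1 ≤ m) :
    ∀ (xs : List Char) (k : Int), (∀ e ∈ starts, e + m ≤ k ∨ k + xs.length ≤ e) →
    (PySem.List.enumerate xs k).map (fun ic => pvTag starts m c0 ic.1 ic.2) = xs.map pvTagO := by
  intro xs
  induction xs with
  | nil => intro k _; simp [PySem.List.enumerate_nil]
  | cons x rest ih =>
    intro k hk
    rw [PySem.List.enumerate_cons]
    simp only [List.map_cons]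
    have hnot : k ∉ starts := by
      intro hmem
      rcases hk k hmem with h | h
      · omega
      · simp at h; omega
    have hany : starts.any (fun s => s < k && k < s + m) = false := by
      rw [List.any_eq_false]
      intro e he
      rcases hk e he with h | h
      · simp; omega
      · simp at h ⊢; omega
    rw [pvTag, if_neg hnot, hany]
    simp only [Bool.false_eq_true, if_false]
    congr 1
    apply ih
    intro e he
    rcases hk e he with h | h
    · left; omega
    · right; simp at h ⊢; omega

-- positions strictly inside a match interval render as 'I' tags
theorem pvSegI (starts : List Int) (m : Int) (c0 : Char) (k : Int) (hk : k ∈ starts)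
    (hsep : ∀ e ∈ starts, e = k ∨ e + m ≤ k ∨ k + m ≤ e) :
    ∀ (ys : List Char) (j : Int), k < j → j + ys.length ≤ k + m →
    (PySem.List.enumerate ys j).map (fun ic => pvTag starts m c0 ic.1 ic.2) = ys.map pvTagI := by
  intro ys
  induction ys with
  | nil => intro j _ _; simp [PySem.List.enumerate_nil]
  | cons y rest ih =>
    intro j hj hlen
    rw [PySem.List.enumerate_cons]
    simp only [List.map_cons]
    have hjm : j < k + m := by simp at hlen; omega
    have hnot : j ∉ starts := by
      intro hmem
      rcases hsep j hmem with h | h | h <;> omega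
    have hany : starts.any (fun s => s < j && j < s + m) = true := by
      rw [List.any_eq_true]
      exact ⟨k, hk, by simp; omega⟩
    rw [pvTag, if_neg hnot, hany]
    simp only [if_true]
    congr 1
    apply ih
    · omega
    · simp at hlen ⊢; omega

-- a whole match interval renders as one 'B' tag followed by 'I' tags
theorem pvSegM (starts : List Int) (c0 : Char) (s1 : List Char) (k : Int) (hk : k ∈ starts)
    (hsep : ∀ e ∈ starts, e = k ∨ e + ((s1.length + 1 : Nat) : Int) ≤ k ∨ k + ((s1.length + 1 : Nat) : Int) ≤ e) :
    (PySem.List.enumerate (c0 :: s1) k).map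
        (fun ic => pvTag starts ((s1.length + 1 : Nat) : Int) c0 ic.1 ic.2)
      = pvTagB c0 :: s1.map pvTagI := by
  rw [PySem.List.enumerate_cons]
  simp only [List.map_cons]
  rw [pvTag, if_pos hk]
  congr 1
  exact pvSegI starts _ c0 k hk hsep s1 (k + 1) (by omega) (by push_cast; omega)

-- main invariant: classifying the suffix against (pre ++ collected) equals A's emit
theorem pvLoop_equiv (n : Nat) : ∀ (t : List Char) (c0 : Char) (s1 : List Char) (start : Nat)
    (hst : start ≤ t.length) (pre : List Int), t.length - start ≤ n →
    (∀ e ∈ pre, e + ((s1.length + 1 : Nat) : Int) ≤ (start : Int)) →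
    (PySem.List.enumerate (t.drop start) (start : Int)).map
        (fun ic => pvTag (pre ++ pvCollect t c0 s1 start hst) ((s1.length + 1 : Nat) : Int) c0 ic.1 ic.2)
      = pvALoop t (c0 :: s1) start hst [] := by
  induction n with
  | zero =>
    intro t c0 s1 start hst pre hn hpre
    rw [pvCollect, pvALoop]
    split
    · rename_i h
      simp only [List.append_nil, List.nil_append]
      apply pvSegO _ _ _ (by omega)
      intro e he
      left; exact hpre e he
    · rename_i h
      exfalso
      have hb := pvFindFrom_bounds t (c0 :: s1) start hst h
      simp at hb; omega
  | succ n ih =>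
    intro t c0 s1 start hst pre hn hpre
    by_cases h : PySem.Chars.findFrom t (c0 :: s1) (start : Int) = -1
    · rw [pvCollect, pvALoop, dif_pos h, dif_pos h]
      simp only [List.append_nil, List.nil_append]
      apply pvSegO _ _ _ (by omega)
      intro e he
      left; exact hpre e he
    · -- a match was found: name its index and the basic bounds as plain hypotheses
      have h0 := h
      have hb := pvFindFrom_bounds t (c0 :: s1) start hst h
      obtain ⟨h1, h2, -⟩ := PySem.Chars.findFrom_natCast_spec t (c0 :: s1) start hst h
      obtain ⟨iI, hiI⟩ : ∃ x, PySem.Chars.findFrom t (c0 :: s1) (start : Int) = x := ⟨_, rfl⟩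
      rw [hiI] at h h1 h2 hb
      obtain ⟨i, hi⟩ : ∃ x, iI.toNat = x := ⟨_, rfl⟩
      rw [hi] at h2 hb
      have hcast : (i : Int) = iI := by
        rw [← hi]; exact Int.toNat_of_nonneg (le_trans (Int.natCast_nonneg start) h1)
      have hb1 : start ≤ i := hb.1
      have hb2 : i + (s1.length + 1) ≤ t.length := by
        have := hb.2; simp at this; omega
      -- unfold one step of both recursions, with nameable proof terms
      have key : pvCollect t c0 s1 start hst
          = iI :: pvCollect t c0 s1 (i + (s1.length + 1)) hb2 := by
        subst hi; subst hiI
        rw [pvCollect, dif_neg h0]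
      have keyA : pvALoop t (c0 :: s1) start hst []
          = ((t.drop start).take (i - start)).map pvTagO
            ++ ((pvTagB c0 :: s1.map pvTagI)
            ++ pvALoop t (c0 :: s1) (i + (s1.length + 1)) hb2 []) := by
        subst hi; subst hiI
        rw [pvALoop, dif_neg h0]
        refine (pvALoop_acc t.length t (c0 :: s1) _ _ _ (by omega)).trans ?_
        simp [List.append_assoc]
      rw [key, keyA]
      have hrest_ge : ∀ x ∈ pvCollect t c0 s1 (i + (s1.length + 1)) hb2,
          ((i + (s1.length + 1) : Nat) : Int) ≤ x :=
        pvCollect_ge t.length t c0 s1 (i + (s1.length + 1)) hb2 (by omega)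
      -- split the remaining text into prefix / match / rest
      obtain ⟨tail, htail⟩ := h2
      have hdropi : t.drop i = (c0 :: s1) ++ tail := htail.symm
      have htail_eq : tail = t.drop (i + (s1.length + 1)) := by
        have h' : (t.drop i).drop (s1.length + 1) = tail := by rw [hdropi]; simp
        rw [← h', List.drop_drop]
        all_goals (congr 1; omega)
      have hsplit : t.drop start
          = (t.drop start).take (i - start) ++ ((c0 :: s1) ++ t.drop (i + (s1.length + 1))) := by
        rw [← htail_eq, ← hdropi]
        have h' : t.drop i = (t.drop start).drop (i - start) := by
          rw [List.drop_drop]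
          congr 1
          omega
        rw [h', List.take_append_drop]
      have hpreflen : ((t.drop start).take (i - start)).length = i - start := by
        simp; omega
      -- separation of all starts from the found interval
      have hsep : ∀ e ∈ pre ++ iI :: pvCollect t c0 s1 (i + (s1.length + 1)) hb2,
          e = iI ∨ e + ((s1.length + 1 : Nat) : Int) ≤ iI
            ∨ iI + ((s1.length + 1 : Nat) : Int) ≤ e := by
        intro e he
        rcases List.mem_append.mp he with he | he
        · right; left; have := hpre e he; push_cast at this ⊢; omega
        · rcases List.mem_cons.mp he with rfl | he'
          · left; rfl
          · right; right; have := hrest_ge e he'; push_cast at this ⊢; omega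
      -- the three rendered segments
      have hO : (PySem.List.enumerate ((t.drop start).take (i - start)) (start : Int)).map
            (fun ic => pvTag (pre ++ iI :: pvCollect t c0 s1 (i + (s1.length + 1)) hb2)
              ((s1.length + 1 : Nat) : Int) c0 ic.1 ic.2)
          = ((t.drop start).take (i - start)).map pvTagO := by
        apply pvSegO _ _ _ (by omega)
        intro e he
        rcases List.mem_append.mp he with he | he
        · left; exact hpre e he
        · right
          rw [hpreflen]
          rcases List.mem_cons.mp he with rfl | he'
          · omega
          · have := hrest_ge e he'; push_cast at this ⊢; omega
      have hM : (PySem.List.enumerate (c0 :: s1) iI).map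
            (fun ic => pvTag (pre ++ iI :: pvCollect t c0 s1 (i + (s1.length + 1)) hb2)
              ((s1.length + 1 : Nat) : Int) c0 ic.1 ic.2)
          = pvTagB c0 :: s1.map pvTagI :=
        pvSegM _ c0 s1 iI (by simp) hsep
      have hR : (PySem.List.enumerate (t.drop (i + (s1.length + 1)))
            ((i + (s1.length + 1) : Nat) : Int)).map
            (fun ic => pvTag (pre ++ iI :: pvCollect t c0 s1 (i + (s1.length + 1)) hb2)
              ((s1.length + 1 : Nat) : Int) c0 ic.1 ic.2)
          = pvALoop t (c0 :: s1) (i + (s1.length + 1)) hb2 [] := by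
        have h' := ih t c0 s1 (i + (s1.length + 1)) hb2 (pre ++ [iI]) (by omega)
          (by intro e he
              rcases List.mem_append.mp he with he | he
              · have := hpre e he; push_cast at this ⊢; omega
              · simp at he; subst he; omega)
        rw [← List.append_cons] at h'
        exact h'
      -- assemble
      have hoff1 : (start : Int) + ((((t.drop start).take (i - start)).length : Nat) : Int) = iI := by
        rw [hpreflen]; push_cast; omega
      have hoff2 : iI + (((c0 :: s1).length : Nat) : Int) = ((i + (s1.length + 1) : Nat) : Int) := by
        push_cast; simp; omega
      conv_lhs => rw [hsplit]
      rw [PySem.List.enumerate_append, PySem.List.enumerate_append,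
          List.map_append, List.map_append, hoff1, hoff2, hO, hM, hR]

-- ===== VERDICT (by name: the statement is the Claim_ definition above) =====
theorem convert_to_sequence_labeling_spec : Claim_equal_convert_to_sequence_labeling := by
  unfold Claim_equal_convert_to_sequence_labeling
  intro text slot _ hpre
  unfold Spec_convert_to_sequence_labeling convert_to_sequence_labeling convert_to_sequence_labeling_alt
  obtain ⟨c0, s1, hcs⟩ : ∃ c0 s1, slot.toList = c0 :: s1 := by
    cases hsl : slot.toList with
    | nil => exact absurd (String.toList_inj.mp (by simp [hsl])) hpre
    | cons a l => exact ⟨a, l, rfl⟩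
  rw [hcs]
  have hmain := pvLoop_equiv text.toList.length text.toList c0 s1 0 (Nat.zero_le _) [] (by omega)
    (by intro e he; simp at he)
  simp only [List.drop_zero, List.nil_append, Nat.cast_zero] at hmain
  exact hmain.symm
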